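-- pv_equiv track=rewrite | github.com/hbiede/LaTeX-Linter | latex-lint.py | remove_math
-- ===== SOURCE A (Python) =====
-- from typing import List, Dict, Tuple
--
-- def remove_math(latex: Dict[str, List[str]]):
--     """
--     Removes all characters enclosed in a math block
--     :param latex: Dict[str, List[str]]
--         A mapping of file names onto a list of that file's lines
--     """
--     for file_name in latex:
--         file = latex[file_name]
--         math_mode: bool = False
--         for i in range(len(file)):
--             new_line = ''
--             for c in file[i]:
--                 if c is '$':
--                     math_mode = not math_mode
--                 elif not math_mode:
--                     new_line += c
--             file[i] = new_line
--     return latex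
-- ===== SOURCE B (Python) =====
-- def keep_text(parts):
--     if not parts:
--         return ''
--     return parts[0] + keep_text(parts[2:])
--
-- def remove_math(latex):
--     for file_name in latex:
--         lines = latex[file_name]
--         math_mode = False
--         for i in range(len(lines)):
--             parts = lines[i].split('$')
--             lines[i] = keep_text(parts[1:] if math_mode else parts)
--             math_mode ^= (len(parts) - 1) % 2 == 1
--     return latex
-- ===== Notes on version B (the rewrite author's own statement) =====
-- stated objective: alternative
-- what changed: Replaces the per-character math-mode toggle with splitting each line on '$' and keeping alternating segments (offset by the carried-over math mode), updating the carry by the parity of the '$' count.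
import Mathlib
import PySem

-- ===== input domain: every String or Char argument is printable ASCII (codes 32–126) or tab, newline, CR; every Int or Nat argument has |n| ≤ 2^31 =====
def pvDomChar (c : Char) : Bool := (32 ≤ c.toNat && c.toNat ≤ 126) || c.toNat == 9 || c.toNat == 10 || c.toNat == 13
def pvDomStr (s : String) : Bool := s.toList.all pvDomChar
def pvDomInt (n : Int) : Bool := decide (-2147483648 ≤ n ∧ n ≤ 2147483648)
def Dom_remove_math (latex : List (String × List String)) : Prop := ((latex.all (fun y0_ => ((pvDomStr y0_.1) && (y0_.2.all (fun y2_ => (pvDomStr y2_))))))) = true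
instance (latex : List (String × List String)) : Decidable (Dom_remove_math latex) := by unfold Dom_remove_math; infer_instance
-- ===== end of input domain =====

-- B replaces A's per-character math-mode toggle by splitting each line on '$' and keeping
-- alternating segments, carrying the mode across lines by the parity of the '$' count.
-- Both A and B mutate the lists inside the dict in place; the equivalence proved is about the return value.


-- ===== PORT A =====
-- per-character loop: toggle math_mode on '$', append the char when not in math mode
def remove_math (latex : List (String × List String)) : List (String × List String) :=
  latex.map (fun fileEntry =>
    (fileEntry.1,
      (fileEntry.2.foldl
        (fun (st : Bool × List String) line =>
          let r := line.toList.foldl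
            (fun (p : Bool × List Char) c =>
              if c = '$' then (!p.1, p.2)
              else if !p.1 then (p.1, p.2 ++ [c])
              else p)
            (st.1, [])
          (r.1, st.2 ++ [String.ofList r.2]))
        (false, [])).2))

-- ===== PORT B =====
-- keep_text(parts): parts[0] + keep_text(parts[2:])
def keepTextChars : List (List Char) → List Char
  | [] => []
  | [p] => p ++ keepTextChars []
  | p :: _ :: rest => p ++ keepTextChars rest

-- line.split('$') is PySem.Chars.splitOn (sep ≠ ""); parts[1:] is List.drop 1
def remove_math_alt (latex : List (String × List String)) : List (String × List String) :=
  latex.map (fun fileEntry =>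
    (fileEntry.1,
      (fileEntry.2.foldl
        (fun (st : Bool × List String) line =>
          let parts := PySem.Chars.splitOn line.toList ['$']
          let kept := if st.1 then keepTextChars (parts.drop 1) else keepTextChars parts
          (xor st.1 (decide ((parts.length - 1) % 2 = 1)), st.2 ++ [String.ofList kept]))
        (false, [])).2))

-- ===== PRECONDITION & SPEC =====
def Spec_remove_math (latex : List (String × List String)) (out : List (String × List String)) : Prop := out = remove_math_alt latex
instance (latex : List (String × List String)) (out : List (String × List String)) : Decidable (Spec_remove_math latex out) := by unfold Spec_remove_math; infer_instance

-- ===== CLAIM (what is proved, stated in full; the proofs are below) =====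
def Claim_equal_remove_math : Prop := ∀ (latex : List (String × List String)), Dom_remove_math latex → Spec_remove_math latex (remove_math latex)

-- ===== LEMMAS AND PROOFS =====

-- a simple recursive description of splitting on '$'
def splitD : List Char → List (List Char)
  | [] => [[]]
  | c :: t => if c = '$' then [] :: splitD t else (splitD t).modifyHead (c :: ·)

theorem splitD_ne_nil (l : List Char) : splitD l ≠ [] := by
  cases l with
  | nil => simp [splitD]
  | cons c t =>
    simp only [splitD]
    split_ifs
    · simp
    · cases h : splitD t with
      | nil => exact absurd h (splitD_ne_nil t)
      | cons a r => simp

theorem keepTextChars_cons (p : List Char) (r : List (List Char)) :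
    keepTextChars (p :: r) = p ++ keepTextChars r.tail := by
  cases r <;> simp [keepTextChars]

theorem splitOn_go_eq (fuel : Nat) (l cur : List Char) (acc : List (List Char))
    (h : l.length < fuel) :
    PySem.Chars.splitOn.go ['$'] fuel l cur acc
      = acc.reverse ++ (splitD l).modifyHead (cur.reverse ++ ·) := by
  induction fuel generalizing l cur acc with
  | zero => omega
  | succ fuel ih =>
    cases l with
    | nil => simp [PySem.Chars.splitOn.go, splitD]
    | cons c t =>
      simp only [PySem.Chars.splitOn.go]
      by_cases hc : c = '$'
      · subst hc
        rw [if_pos (by simp [List.isPrefixOf])]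
        rw [ih _ _ _ (by simpa using Nat.lt_of_succ_lt_succ h)]
        cases hsp : splitD t with
        | nil => exact absurd hsp (splitD_ne_nil t)
        | cons a r => simp [splitD, hsp]
      · rw [if_neg (by simp [List.isPrefixOf, Ne.symm hc])]
        rw [ih _ _ _ (by simpa using Nat.lt_of_succ_lt_succ h)]
        simp only [splitD, if_neg hc]
        cases hsp : splitD t with
        | nil => exact absurd hsp (splitD_ne_nil t)
        | cons a r => simp

theorem splitOn_eq_splitD (l : List Char) :
    PySem.Chars.splitOn l ['$'] = splitD l := by
  show PySem.Chars.splitOn.go ['$'] (l.length + 1) l [] [] = splitD l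
  rw [splitOn_go_eq _ _ _ _ (Nat.lt_succ_self _)]
  cases hsp : splitD l with
  | nil => exact absurd hsp (splitD_ne_nil l)
  | cons a r => simp

-- one-step reductions of A's character loop body
theorem stepA_dollar (m : Bool) (acc : List Char) :
    (if '$' = '$' then (!(m, acc).1, (m, acc).2)
     else if (!(m, acc).1) = true then ((m, acc).1, (m, acc).2 ++ ['$']) else (m, acc)) = (!m, acc) := by
  simp

theorem stepA_keep (acc : List Char) (c : Char) (hc : ¬c = '$') :
    (if c = '$' then (!(false, acc).1, (false, acc).2)
     else if (!(false, acc).1) = true then ((false, acc).1, (false, acc).2 ++ [c]) else (false, acc))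
    = (false, acc ++ [c]) := by
  simp [hc]

theorem stepA_skip (acc : List Char) (c : Char) (hc : ¬c = '$') :
    (if c = '$' then (!(true, acc).1, (true, acc).2)
     else if (!(true, acc).1) = true then ((true, acc).1, (true, acc).2 ++ [c]) else (true, acc))
    = (true, acc) := by
  simp [hc]

-- the per-line character loop of A, described by splitD
theorem charLoop_eq (cs : List Char) (m : Bool) (acc : List Char) :
    cs.foldl
      (fun (p : Bool × List Char) c =>
        if c = '$' then (!p.1, p.2)
        else if !p.1 then (p.1, p.2 ++ [c])
        else p)
      (m, acc)
    = (xor m (decide ((splitD cs).length % 2 = 0)),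
       acc ++ (if m then keepTextChars ((splitD cs).drop 1) else keepTextChars (splitD cs))) := by
  induction cs generalizing m acc with
  | nil => cases m <;> simp [splitD, keepTextChars]
  | cons c t ih =>
    cases hsp : splitD t with
    | nil => exact absurd hsp (splitD_ne_nil t)
    | cons a r =>
      by_cases hc : c = '$'
      · subst hc
        rw [List.foldl_cons, stepA_dollar, ih]
        rcases Nat.mod_two_eq_zero_or_one r.length with h | h <;>
          cases m <;>
          simp [splitD, hsp, keepTextChars_cons, Nat.add_mod, h]
      · cases m with
        | false =>
          rw [List.foldl_cons, stepA_keep acc c hc, ih]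
          simp [splitD, hc, hsp, keepTextChars_cons]
        | true =>
          rw [List.foldl_cons, stepA_skip acc c hc, ih]
          simp [splitD, hc, hsp]

-- the two per-line step functions agree
theorem line_step_eq (st : Bool × List String) (line : String) :
    (let r := line.toList.foldl
        (fun (p : Bool × List Char) c =>
          if c = '$' then (!p.1, p.2)
          else if !p.1 then (p.1, p.2 ++ [c])
          else p)
        (st.1, [])
     (r.1, st.2 ++ [String.ofList r.2]))
    = (let parts := PySem.Chars.splitOn line.toList ['$']
       let kept := if st.1 then keepTextChars (parts.drop 1) else keepTextChars parts
       (xor st.1 (decide ((parts.length - 1) % 2 = 1)), st.2 ++ [String.ofList kept])) := by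
  simp only [charLoop_eq, splitOn_eq_splitD, List.nil_append]
  refine Prod.ext ?_ rfl
  have h1 : 1 ≤ (splitD line.toList).length :=
    List.length_pos_of_ne_nil (splitD_ne_nil _)
  have h2 : ((splitD line.toList).length % 2 = 0) = (((splitD line.toList).length - 1) % 2 = 1) := by
    apply propext; omega
  simp only [h2]

theorem remove_math_eq_alt (latex : List (String × List String)) :
    remove_math latex = remove_math_alt latex := by
  unfold remove_math remove_math_alt
  have h : (fun (st : Bool × List String) (line : String) =>
      let r := line.toList.foldl
        (fun (p : Bool × List Char) c =>
          if c = '$' then (!p.1, p.2)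
          else if !p.1 then (p.1, p.2 ++ [c])
          else p)
        (st.1, [])
      (r.1, st.2 ++ [String.ofList r.2]))
    = (fun (st : Bool × List String) (line : String) =>
       let parts := PySem.Chars.splitOn line.toList ['$']
       let kept := if st.1 then keepTextChars (parts.drop 1) else keepTextChars parts
       (xor st.1 (decide ((parts.length - 1) % 2 = 1)), st.2 ++ [String.ofList kept])) :=
    funext fun st => funext fun line => line_step_eq st line
  simp only [h]

-- ===== VERDICT (by name: the statement is the Claim_ definition above) =====
theorem remove_math_spec : Claim_equal_remove_math := by
  intro latex _
  unfold Spec_remove_math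
  exact remove_math_eq_alt latex
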